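-- pv_equiv track=rewrite | github.com/kwant-project/kwant | kwant/version.py | get_version_from_git_archive
-- ===== SOURCE A (Python) =====
-- def get_version_from_git_archive(version_info):
--     try:
--         refnames = version_info['refnames']
--         git_hash = version_info['git_hash']
--     except KeyError:
--         # These fields are not present if we are running from an sdist.
--         # Execution should never reach here, though
--         return None
--
--     if git_hash.startswith('$Format') or refnames.startswith('$Format'):
--         # variables not expanded during 'git archive'
--         return None
--
--     VTAG = 'tag: v'  # Our version tags always start with 'v'
--     refs = set(r.strip() for r in refnames.split(","))
--     version_tags = set(r[len(VTAG):] for r in refs if r.startswith(VTAG))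
--     if version_tags:
--         release, *_ = sorted(version_tags)  # prefer e.g. "2.0" over "2.0rc1"
--         return release
--     else:
--         return ''.join(('unknown', '+g', git_hash))
-- ===== SOURCE B (Python) =====
-- def get_version_from_git_archive(version_info):
--     try:
--         refnames = version_info['refnames']
--         git_hash = version_info['git_hash']
--     except KeyError:
--         return None
--
--     if git_hash.startswith('$Format') or refnames.startswith('$Format'):
--         return None
--
--     VTAG = 'tag: v'
--     best = None
--     for r in refnames.split(','):
--         r = r.strip()
--         if r.startswith(VTAG):
--             v = r[len(VTAG):]
--             if best is None or v < best:
--                 best = v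
--     if best is not None:
--         return best
--     return ''.join(('unknown', '+g', git_hash))
-- ===== Notes on version B (the rewrite author's own statement) =====
-- stated objective: simpler
-- what changed: Replaces the two intermediate sets and the full sort by a single pass over the split refnames that keeps a running minimum tag suffix.
import Mathlib
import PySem

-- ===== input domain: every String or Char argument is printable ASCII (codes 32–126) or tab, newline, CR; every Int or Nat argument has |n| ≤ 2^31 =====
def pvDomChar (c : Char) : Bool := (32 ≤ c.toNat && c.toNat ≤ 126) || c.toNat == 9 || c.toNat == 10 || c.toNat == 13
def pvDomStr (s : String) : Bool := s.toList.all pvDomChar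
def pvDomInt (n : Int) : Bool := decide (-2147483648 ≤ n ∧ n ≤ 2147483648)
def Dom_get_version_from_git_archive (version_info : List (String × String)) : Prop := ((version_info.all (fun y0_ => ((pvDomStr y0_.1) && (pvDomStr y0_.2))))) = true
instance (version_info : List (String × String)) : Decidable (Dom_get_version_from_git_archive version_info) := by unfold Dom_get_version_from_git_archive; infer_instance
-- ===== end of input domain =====

-- B replaces A's two intermediate sets and full sort by one pass over the split refnames keeping a running minimum (objective: simpler).

-- ===== PORT A =====
def get_version_from_git_archive (version_info : List (String × String)) : Option String :=
  let d := PySem.Dict.ofList version_info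
  match d.get? "refnames", d.get? "git_hash" with
  | some refnames, some git_hash =>
    if PySem.Str.startswith git_hash "$Format" || PySem.Str.startswith refnames "$Format" then
      none
    else
      let refs : PySem.Set String :=
        PySem.Set.ofList ((((PySem.Chars.splitOn refnames.toList (",".toList)).map String.ofList).map (fun r => PySem.Str.strip r)))
      let version_tags : PySem.Set String :=
        PySem.Set.ofList
          ((refs.filter (fun r => PySem.Str.startswith r "tag: v")).map
            (fun r => PySem.Str.slice r (some 6) none))
      match PySem.List.sorted version_tags (fun x => x) false with
      | release :: _ => some release
      | [] => some (PySem.Str.join "" ["unknown", "+g", git_hash])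
  | _, _ => none

-- ===== PORT B =====
-- the 'for r in refnames.split(",")' loop of Source B, carrying the running best
def pvAltLoop (rs : List String) (best : Option String) : Option String :=
  match rs with
  | [] => best
  | r :: rest =>
    let s := PySem.Str.strip r
    if PySem.Str.startswith s "tag: v" then
      let v := PySem.Str.slice s (some 6) none
      match best with
      | none => pvAltLoop rest (some v)
      | some b => pvAltLoop rest (some (if v < b then v else b))
    else pvAltLoop rest best

def get_version_from_git_archive_alt (version_info : List (String × String)) : Option String :=
  let d := PySem.Dict.ofList version_info
  match d.get? "refnames" with
  | none => none
  | some refnames =>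
    match d.get? "git_hash" with
    | none => none
    | some git_hash =>
      if PySem.Str.startswith git_hash "$Format" || PySem.Str.startswith refnames "$Format" then
        none
      else
        match pvAltLoop ((PySem.Chars.splitOn refnames.toList (",".toList)).map String.ofList) none with
        | some best => some best
        | none => some (PySem.Str.join "" ["unknown", "+g", git_hash])

-- ===== PRECONDITION & SPEC =====
def Spec_get_version_from_git_archive (version_info : List (String × String)) (out : Option String) : Prop := out = get_version_from_git_archive_alt version_info
instance (version_info : List (String × String)) (out : Option String) : Decidable (Spec_get_version_from_git_archive version_info out) := by unfold Spec_get_version_from_git_archive; infer_instance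

-- ===== CLAIM (what is proved, stated in full; the proofs are below) =====
def Claim_equal_get_version_from_git_archive : Prop := ∀ (version_info : List (String × String)), Dom_get_version_from_git_archive version_info → Spec_get_version_from_git_archive version_info (get_version_from_git_archive version_info)

-- ===== LEMMAS AND PROOFS =====

-- the multiset of tag suffixes B's loop sees
def pvTags (rs : List String) : List String :=
  ((rs.map (fun r => PySem.Str.strip r)).filter (fun r => PySem.Str.startswith r "tag: v")).map
    (fun r => PySem.Str.slice r (some 6) none)

lemma pvTags_cons (r : String) (rest : List String) :
    pvTags (r :: rest) =
      if PySem.Str.startswith (PySem.Str.strip r) "tag: v" then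
        PySem.Str.slice (PySem.Str.strip r) (some 6) none :: pvTags rest
      else pvTags rest := by
  simp only [pvTags, List.map_cons, List.filter_cons]
  split_ifs with h <;> simp

lemma pvIfMin (v b : String) : (if v < b then v else b) = min b v := by
  rw [min_def]
  split_ifs with h1 h2 h2
  · exact absurd h2 (not_le.mpr h1)
  · rfl
  · rfl
  · exact absurd (not_le.mp h2) h1

lemma pvAltLoop_some (rs : List String) (b : String) :
    pvAltLoop rs (some b) = some ((pvTags rs).foldl min b) := by
  induction rs generalizing b with
  | nil => simp [pvAltLoop, pvTags]
  | cons r rest ih =>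
    by_cases h : PySem.Str.startswith (PySem.Str.strip r) "tag: v" = true
    · rw [pvTags_cons, if_pos h]
      simp only [pvAltLoop, h, if_pos]
      rw [ih, pvIfMin, List.foldl_cons]
    · rw [pvTags_cons, if_neg h]
      simp only [pvAltLoop, h, Bool.false_eq_true, if_false]
      exact ih b

lemma pvAltLoop_none (rs : List String) :
    pvAltLoop rs none =
      match pvTags rs with
      | [] => none
      | t :: ts => some (ts.foldl min t) := by
  induction rs with
  | nil => simp [pvAltLoop, pvTags]
  | cons r rest ih =>
    by_cases h : PySem.Str.startswith (PySem.Str.strip r) "tag: v" = true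
    · rw [pvTags_cons, if_pos h]
      simp only [pvAltLoop, h, if_pos]
      exact pvAltLoop_some rest _
    · rw [pvTags_cons, if_neg h]
      simp only [pvAltLoop, h, Bool.false_eq_true, if_false]
      exact ih

-- A's tag list is membership-equal to pvTags
lemma mem_tagsA (rs : List String) (x : String) :
    (x ∈ ((PySem.Set.ofList (rs.map (fun r => PySem.Str.strip r))).filter
            (fun r => PySem.Str.startswith r "tag: v")).map
            (fun r => PySem.Str.slice r (some 6) none)) ↔ x ∈ pvTags rs := by
  simp only [pvTags, List.mem_map, List.mem_filter, PySem.Set.mem_ofList]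

lemma pvMain (rs : List String) (gh : String) :
    (match PySem.List.sorted
        (PySem.Set.ofList
          (((PySem.Set.ofList (rs.map (fun r => PySem.Str.strip r))).filter
              (fun r => PySem.Str.startswith r "tag: v")).map
              (fun r => PySem.Str.slice r (some 6) none)))
        (fun x => x) false with
      | release :: _ => some release
      | [] => some (PySem.Str.join "" ["unknown", "+g", gh])) =
    (match pvAltLoop rs none with
      | some best => some best
      | none => some (PySem.Str.join "" ["unknown", "+g", gh])) := by
  set tagsA := ((PySem.Set.ofList (rs.map (fun r => PySem.Str.strip r))).filter
      (fun r => PySem.Str.startswith r "tag: v")).map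
      (fun r => PySem.Str.slice r (some 6) none) with htA
  have hmem : ∀ x, x ∈ PySem.Set.ofList tagsA ↔ x ∈ pvTags rs := by
    intro x
    rw [PySem.Set.mem_ofList, htA, mem_tagsA]
  rw [pvAltLoop_none]
  rcases hT : pvTags rs with _ | ⟨t, ts⟩
  · have hnil : PySem.Set.ofList tagsA = [] :=
      List.eq_nil_iff_forall_not_mem.mpr (fun x hx => by simpa [hT] using (hmem x).mp hx)
    rw [(PySem.List.sorted_eq_nil_iff _ _ _).mpr hnil]
  · have hb := PySem.List.foldl_min_le ts t
    have hbm : List.foldl min t ts ∈ pvTags rs := by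
      rw [hT]
      rcases PySem.List.foldl_min_mem ts t with h | h
      · rw [h]; exact List.mem_cons_self
      · exact List.mem_cons_of_mem _ h
    rcases hS : PySem.List.sorted (PySem.Set.ofList tagsA) (fun x => x) false with _ | ⟨m, rest⟩
    · exfalso
      have hnil : PySem.Set.ofList tagsA = [] := (PySem.List.sorted_eq_nil_iff _ _ _).mp hS
      have ht : t ∈ PySem.Set.ofList tagsA := (hmem t).mpr (hT ▸ List.mem_cons_self)
      rw [hnil] at ht
      simp at ht
    · have hmmem : m ∈ pvTags rs :=
        (hmem m).mp ((PySem.List.mem_sorted _ _ _ _).mp (hS ▸ List.mem_cons_self))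
      have hmin : ∀ y ∈ pvTags rs, m ≤ y := fun y hy =>
        PySem.List.key_head_sorted_le _ _ hS y ((hmem y).mpr hy)
      have h1 : m ≤ List.foldl min t ts := hmin _ hbm
      have h2 : List.foldl min t ts ≤ m := by
        rw [hT] at hmmem
        rcases List.mem_cons.mp hmmem with rfl | h
        · exact hb.1
        · exact hb.2 m h
      simp [le_antisymm h1 h2]

-- ===== VERDICT (by name: the statement is the Claim_ definition above) =====
theorem get_version_from_git_archive_spec : Claim_equal_get_version_from_git_archive := by
  intro version_info _
  unfold Spec_get_version_from_git_archive
  unfold get_version_from_git_archive get_version_from_git_archive_alt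
  rcases h1 : (PySem.Dict.ofList version_info).get? "refnames" with _ | refnames <;>
    rcases h2 : (PySem.Dict.ofList version_info).get? "git_hash" with _ | git_hash <;>
    simp only [h1, h2]
  split_ifs with h
  · rfl
  · exact pvMain ((PySem.Chars.splitOn refnames.toList (",".toList)).map String.ofList) git_hash
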